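-- pv_equiv track=rewrite | github.com/tolparow/it_project_2 | message_processing/encoding/golay.py | _make_3bit_errors
-- ===== SOURCE A (Python) =====
-- def _make_3bit_errors(vector_length=24):
--     """
--     Return list of all bitvectors with <= 3 bits as 1's, rest 0's
--     returns list of lists, each 24 bits long by default.
--     """
--     errorvecs = [[0] * vector_length]  # all zeros
--     # one 1
--     for i in range(vector_length):
--         vec = [0] * vector_length
--         vec[i] = 1
--         errorvecs.append(vec)
--
--     # two 1s
--     for i in range(vector_length):
--         for j in range(i + 1, vector_length):
--             vec = [0] * vector_length
--             vec[i] = 1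
--             vec[j] = 1
--             errorvecs.append(vec)
--
--     # three 1s
--     for i in range(vector_length):
--         for j in range(i + 1, vector_length):
--             for k in range(j + 1, vector_length):
--                 vec = [0] * vector_length
--                 vec[i] = 1
--                 vec[j] = 1
--                 vec[k] = 1
--                 errorvecs.append(vec)
--     return errorvecs
-- ===== SOURCE B (Python) =====
-- def _combs(items, r):
--     # all r-element combinations of items, in lexicographic (itertools) order
--     if r == 0:
--         return [[]]
--     if not items:
--         return []
--     x, rest = items[0], items[1:]
--     return [[x] + c for c in _combs(rest, r - 1)] + _combs(rest, r)
--
--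
-- def _make_3bit_errors(vector_length=24):
--     errorvecs = []
--     for r in range(4):
--         for combo in _combs(list(range(vector_length)), r):
--             vec = [0] * vector_length
--             for idx in combo:
--                 vec[idx] = 1
--             errorvecs.append(vec)
--     return errorvecs
-- ===== Notes on version B (the rewrite author's own statement) =====
-- stated objective: simpler
-- what changed: Replaces the four hand-unrolled loop nests (all-zeros, one-bit, two-bit, three-bit) by a single loop over r in range(4) that turns each r-combination of indices, produced by one recursive combinations helper, into a bit vector.
import Mathlib
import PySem

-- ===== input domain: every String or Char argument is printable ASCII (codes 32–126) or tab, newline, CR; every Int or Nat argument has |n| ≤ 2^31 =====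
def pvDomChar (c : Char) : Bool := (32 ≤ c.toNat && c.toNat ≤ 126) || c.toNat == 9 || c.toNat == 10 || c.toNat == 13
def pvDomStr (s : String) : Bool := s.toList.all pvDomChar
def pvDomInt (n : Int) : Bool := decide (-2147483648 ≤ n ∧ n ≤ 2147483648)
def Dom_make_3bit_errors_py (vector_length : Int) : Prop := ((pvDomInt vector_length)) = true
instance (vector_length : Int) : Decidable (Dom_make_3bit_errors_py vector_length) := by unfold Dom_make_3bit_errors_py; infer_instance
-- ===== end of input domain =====

-- B replaces A's four hand-unrolled loop nests by one loop over r = 0..3 mapping each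
-- r-combination of indices (from a recursive combinations helper) to a bit vector; simpler, same cost.


-- ===== PORT A =====
-- vec[i] = 1 with i drawn from range(...) is always a nonnegative in-range index,
-- so List.set i.toNat is exact there.
def make_3bit_errors_py (vector_length : Int) : List (List Int) :=
  let z : List Int := List.replicate vector_length.toNat 0   -- [0] * vector_length
  let e0 : List (List Int) := [z]
  let e1 := (PySem.List.pyRange 0 vector_length 1).foldl
    (fun acc i => acc ++ [z.set i.toNat 1]) e0
  let e2 := (PySem.List.pyRange 0 vector_length 1).foldl
    (fun acc i => (PySem.List.pyRange (i + 1) vector_length 1).foldl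
      (fun acc2 j => acc2 ++ [(z.set i.toNat 1).set j.toNat 1]) acc) e1
  let e3 := (PySem.List.pyRange 0 vector_length 1).foldl
    (fun acc i => (PySem.List.pyRange (i + 1) vector_length 1).foldl
      (fun acc2 j => (PySem.List.pyRange (j + 1) vector_length 1).foldl
        (fun acc3 k => acc3 ++ [((z.set i.toNat 1).set j.toNat 1).set k.toNat 1]) acc2) acc) e2
  e3

-- ===== PORT B =====
-- _combs(items, r): all r-element combinations, lexicographic
def pvComb : Nat → List Int → List (List Int)
  | 0, _ => [[]]
  | _ + 1, [] => []
  | r + 1, x :: xs => (pvComb r xs).map (fun c => x :: c) ++ pvComb (r + 1) xs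

def make_3bit_errors_py_alt (vector_length : Int) : List (List Int) :=
  (PySem.List.pyRange 0 4 1).foldl
    (fun acc r => (pvComb r.toNat (PySem.List.pyRange 0 vector_length 1)).foldl
      (fun acc2 combo =>
        acc2 ++ [combo.foldl (fun vec idx => vec.set idx.toNat 1)
                   (List.replicate vector_length.toNat 0)]) acc) []

-- ===== PRECONDITION & SPEC =====
def Spec_make_3bit_errors_py (vector_length : Int) (out : List (List Int)) : Prop := out = make_3bit_errors_py_alt vector_length
instance (vector_length : Int) (out : List (List Int)) : Decidable (Spec_make_3bit_errors_py vector_length out) := by unfold Spec_make_3bit_errors_py; infer_instance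

-- ===== CLAIM (what is proved, stated in full; the proofs are below) =====
def Claim_equal_make_3bit_errors_py : Prop := ∀ (vector_length : Int), Dom_make_3bit_errors_py vector_length → Spec_make_3bit_errors_py vector_length (make_3bit_errors_py vector_length)

-- ===== LEMMAS AND PROOFS =====

-- list of f i j for i before j in l (in A's two-nested-loops order)
def pvPairs (f : Int → Int → List Int) : List Int → List (List Int)
  | [] => []
  | x :: xs => xs.map (f x) ++ pvPairs f xs

-- list of g i j k for i before j before k in l (in A's three-nested-loops order)
def pvTriples (g : Int → Int → Int → List Int) : List Int → List (List Int)
  | [] => []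
  | x :: xs => pvPairs (g x) xs ++ pvTriples g xs

theorem pvComb_one_map (v : List Int) (l : List Int) :
    (pvComb 1 l).map (fun c => c.foldl (fun vec idx => vec.set idx.toNat 1) v)
      = l.map (fun i => v.set i.toNat 1) := by
  induction l with
  | nil => rfl
  | cons x xs ih => simp [pvComb, ih]

theorem pvComb_two_map (v : List Int) (l : List Int) :
    (pvComb 2 l).map (fun c => c.foldl (fun vec idx => vec.set idx.toNat 1) v)
      = pvPairs (fun i j => (v.set i.toNat 1).set j.toNat 1) l := by
  induction l generalizing v with
  | nil => rfl
  | cons x xs ih =>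
      simp only [pvComb, pvPairs, List.map_append, List.map_map]
      rw [← ih v]
      congr 1
      have := pvComb_one_map (v.set x.toNat 1) xs
      simpa [Function.comp] using this

theorem pvComb_three_map (v : List Int) (l : List Int) :
    (pvComb 3 l).map (fun c => c.foldl (fun vec idx => vec.set idx.toNat 1) v)
      = pvTriples (fun i j k => ((v.set i.toNat 1).set j.toNat 1).set k.toNat 1) l := by
  induction l generalizing v with
  | nil => rfl
  | cons x xs ih =>
      simp only [pvComb, pvTriples, List.map_append, List.map_map]
      rw [← ih v]
      congr 1
      have := pvComb_two_map (v.set x.toNat 1) xs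
      simpa [Function.comp] using this

theorem loop2_range_aux (n : Int) (f : Int → Int → List Int) :
    ∀ (m : Nat) (a : Int), (n - a).toNat = m →
      (PySem.List.pyRange a n 1).flatMap
          (fun i => (PySem.List.pyRange (i + 1) n 1).map (f i))
        = pvPairs f (PySem.List.pyRange a n 1) := by
  intro m
  induction m with
  | zero =>
      intro a h
      rw [PySem.List.pyRange_one_eq_nil (by omega)]
      rfl
  | succ m ih =>
      intro a h
      rw [PySem.List.pyRange_one_cons (by omega : a < n)]
      simp only [List.flatMap_cons, pvPairs]
      rw [ih (a + 1) (by omega)]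

theorem loop2_range (n a : Int) (f : Int → Int → List Int) :
    (PySem.List.pyRange a n 1).flatMap
        (fun i => (PySem.List.pyRange (i + 1) n 1).map (f i))
      = pvPairs f (PySem.List.pyRange a n 1) :=
  loop2_range_aux n f _ a rfl

theorem loop3_range_aux (n : Int) (g : Int → Int → Int → List Int) :
    ∀ (m : Nat) (a : Int), (n - a).toNat = m →
      (PySem.List.pyRange a n 1).flatMap
          (fun i => pvPairs (g i) (PySem.List.pyRange (i + 1) n 1))
        = pvTriples g (PySem.List.pyRange a n 1) := by
  intro m
  induction m with
  | zero =>
      intro a h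
      rw [PySem.List.pyRange_one_eq_nil (by omega)]
      rfl
  | succ m ih =>
      intro a h
      rw [PySem.List.pyRange_one_cons (by omega : a < n)]
      simp only [List.flatMap_cons, pvTriples]
      rw [ih (a + 1) (by omega)]

theorem loop3_range (n a : Int) (g : Int → Int → Int → List Int) :
    (PySem.List.pyRange a n 1).flatMap
        (fun i => pvPairs (g i) (PySem.List.pyRange (i + 1) n 1))
      = pvTriples g (PySem.List.pyRange a n 1) :=
  loop3_range_aux n g _ a rfl

theorem pyRange_zero_four : PySem.List.pyRange 0 4 1 = [0, 1, 2, 3] := by decide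

-- ===== VERDICT (by name: the statement is the Claim_ definition above) =====
theorem make_3bit_errors_py_spec : Claim_equal_make_3bit_errors_py := by
  intro n _
  unfold Spec_make_3bit_errors_py make_3bit_errors_py make_3bit_errors_py_alt
  rw [pyRange_zero_four]
  simp only [List.foldl_cons, List.foldl_nil,
    PySem.List.foldl_append_singleton_eq_map, PySem.List.foldl_append_eq_flatMap]
  simp only [loop2_range, loop3_range]
  simp [pvComb_one_map, pvComb_two_map, pvComb_three_map, pvComb, List.append_assoc]
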